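-- pv_equiv track=rewrite | github.com/sherry-debug715/Algorithms-notes | TwoPointers/TwoSumUniquePairs/hashmap.py | two_sum6
-- ===== SOURCE A (Python) =====
-- from typing import (
--     List,
-- )
--
-- def two_sum6(nums: List[int], target: int) -> int:
--     # write your code here
--     pair = 0
--     hashmap = {}
--
--     if not nums or len(nums) == 1:
--         return pair
--
--     for num in nums:
--         diff = target - num
--         if diff in hashmap and hashmap[diff] is None:
--             hashmap[diff] = 1
--             pair += 1
--             hashmap[num] = 1
--         if num not in hashmap:
--             hashmap[num] = None
--
--     return pair
-- ===== SOURCE B (Python) =====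
-- def two_sum6(nums, target):
--     s = set(nums)
--     count = sum(1 for a in s if 2 * a < target and target - a in s)
--     if target % 2 == 0 and nums.count(target // 2) >= 2:
--         count += 1
--     return count
-- ===== Notes on version B (the rewrite author's own statement) =====
-- stated objective: idiomatic
-- what changed: Replaced the stateful one-pass hashmap pairing machine (dict with None/1 marker values) by a declarative set-based count: build set(nums) once, count distinct values a with 2*a < target whose complement is also present, and add one self-pair when target is even and target//2 occurs at least twice.
import Mathlib
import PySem

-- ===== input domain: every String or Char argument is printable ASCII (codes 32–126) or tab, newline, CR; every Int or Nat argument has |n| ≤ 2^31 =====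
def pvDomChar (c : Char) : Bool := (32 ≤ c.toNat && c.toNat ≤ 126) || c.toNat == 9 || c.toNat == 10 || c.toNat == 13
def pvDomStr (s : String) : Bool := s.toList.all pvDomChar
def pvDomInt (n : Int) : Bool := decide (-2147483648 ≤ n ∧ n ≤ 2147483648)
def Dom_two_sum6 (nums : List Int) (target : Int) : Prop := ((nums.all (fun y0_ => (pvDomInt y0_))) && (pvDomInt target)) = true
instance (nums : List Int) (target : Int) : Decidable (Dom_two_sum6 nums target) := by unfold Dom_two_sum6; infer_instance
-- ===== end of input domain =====

-- B replaces A's stateful hashmap pairing pass with an idiomatic set-based count (same values on all inputs).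

-- ===== PORT A =====
-- one iteration of A's 'for num in nums' loop over the state (pair, hashmap)
def twoSumStep (target : Int) (st : Int × PySem.Dict Int (Option Int)) (num : Int) :
    Int × PySem.Dict Int (Option Int) :=
  let diff := target - num
  let st1 :=
    if st.2.get? diff = some none then
      (st.1 + 1, (st.2.insert diff (some 1)).insert num (some 1))
    else st
  if st1.2.get? num = none then (st1.1, st1.2.insert num none) else st1

def two_sum6 (nums : List Int) (target : Int) : Int :=
  let pair : Int := 0
  if nums = [] ∨ nums.length = 1 then pair
  else (nums.foldl (twoSumStep target) (pair, PySem.Dict.empty)).1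

-- ===== PORT B =====
def two_sum6_alt (nums : List Int) (target : Int) : Int :=
  let s : PySem.Set Int := PySem.Set.ofList nums
  let count : Int :=
    (s.countP (fun a => decide (2 * a < target) && PySem.Set.contains s (target - a)) : Nat)
  if PySem.Int.mod target 2 = 0 ∧ 2 ≤ PySem.List.count nums (PySem.Int.floordiv target 2) then
    count + 1
  else count

-- ===== PRECONDITION & SPEC =====
def Spec_two_sum6 (nums : List Int) (target : Int) (out : Int) : Prop := out = two_sum6_alt nums target
instance (nums : List Int) (target : Int) (out : Int) : Decidable (Spec_two_sum6 nums target out) := by unfold Spec_two_sum6; infer_instance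

-- ===== CLAIM (what is proved, stated in full; the proofs are below) =====
def Claim_equal_two_sum6 : Prop := ∀ (nums : List Int) (target : Int), Dom_two_sum6 nums target → Spec_two_sum6 nums target (two_sum6 nums target)

-- ===== LEMMAS AND PROOFS =====

-- 'the pair {v, target-v} has been counted after processing prefix P'
def dnb (target : Int) (P : List Int) (v : Int) : Bool :=
  decide ((target - v) ∈ P ∧ (2 * v = target → 2 ≤ P.count v))

-- values whose pair has been counted and which are the small half (ties = self pair)
def goodB (target : Int) (P : List Int) (v : Int) : Bool :=
  decide (2 * v ≤ target) && dnb target P v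

-- number of pairs counted after processing prefix P
def Zc (target : Int) (P : List Int) : Nat :=
  (PySem.Set.ofList P).countP (goodB target P)

-- the exact contents of A's hashmap after processing prefix P
def mSpec (target : Int) (P : List Int) (v : Int) : Option (Option Int) :=
  if v ∈ P then some (if dnb target P v then some 1 else none) else none

lemma dnb_append (target : Int) (P : List Int) (num v : Int) (hv : v ≠ target - num) :
    dnb target (P ++ [num]) v = dnb target P v := by
  have hv' : target - v ≠ num := by omega
  unfold dnb
  apply decide_eq_decide.mpr
  by_cases hvn : v = num
  · subst hvn
    have h2 : 2 * v ≠ target := by omega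
    simp [List.mem_append, hv', h2]
  · have hvn' : ¬ num = v := fun h => hvn h.symm
    have hc : (P ++ [num]).count v = P.count v := by
      simp [List.count_append, List.count_cons, hvn']
    simp [List.mem_append, hv', hc]

lemma countP_flip {s : List Int} (hs : s.Nodup) {a : Int} (ha : a ∈ s) (f g : Int → Bool)
    (hag : ∀ v ∈ s, v ≠ a → f v = g v) :
    s.countP f + (if g a then 1 else 0) = s.countP g + (if f a then 1 else 0) := by
  induction s with
  | nil => cases ha
  | cons x xs ih =>
    rcases List.nodup_cons.mp hs with ⟨hx, hxs⟩
    by_cases hxa : x = a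
    · subst hxa
      have hcong : xs.countP f = xs.countP g :=
        List.countP_congr (fun v hv => by
          rw [hag v (List.mem_cons_of_mem _ hv) (fun he => hx (he ▸ hv))])
      simp only [List.countP_cons, hcong]
      split_ifs <;> omega
    · have ha' : a ∈ xs := by
        rcases List.mem_cons.mp ha with h | h
        · exact absurd h.symm hxa
        · exact h
      have hfx : f x = g x := hag x List.mem_cons_self hxa
      have := ih hxs ha' (fun v hv hva => hag v (List.mem_cons_of_mem _ hv) hva)
      simp only [List.countP_cons, hfx]
      omega

lemma countP_split (s : List Int) (f g h : Int → Bool)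
    (hfg : ∀ v ∈ s, f v = (g v || h v) ∧ ¬(g v = true ∧ h v = true)) :
    s.countP f = s.countP g + s.countP h := by
  induction s with
  | nil => simp
  | cons x xs ih =>
    have hx := hfg x List.mem_cons_self
    have := ih (fun v hv => hfg v (List.mem_cons_of_mem _ hv))
    simp only [List.countP_cons, this, hx.1]
    rcases hg : g x with _ | _ <;> rcases hh : h x with _ | _ <;>
      simp_all <;> omega

lemma step_inv (target : Int) (P : List Int) (pair : Int) (d : PySem.Dict Int (Option Int))
    (hd : ∀ v, d.get? v = mSpec target P v) (hp : pair = (Zc target P : Int)) (num : Int) :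
    (∀ v, (twoSumStep target (pair, d) num).2.get? v = mSpec target (P ++ [num]) v) ∧
    (twoSumStep target (pair, d) num).1 = (Zc target (P ++ [num]) : Int) := by
  have hsimp : target - (target - num) = num := by omega
  have hnd : (PySem.Set.ofList P).Nodup := PySem.Set.nodup_ofList P
  have hs' : PySem.Set.ofList (P ++ [num]) = PySem.Set.add (PySem.Set.ofList P) num :=
    PySem.Set.ofList_append_singleton P num
  have hnummem : num ∈ P ++ [num] := by simp
  have hcount_num : (P ++ [num]).count num = P.count num + 1 := by
    simp [List.count_append]
  have key_dnb_self : (target - num) ∈ P → dnb target (P ++ [num]) num = true := by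
    intro hdi
    simp only [dnb, decide_eq_true_eq]
    refine ⟨List.mem_append_left _ hdi, ?_⟩
    intro h2
    have he : target - num = num := by omega
    have h1 : 1 ≤ P.count num := List.count_pos_iff.mpr (he ▸ hdi)
    rw [hcount_num]; omega
  have key_dnb_diff : (target - num) ∈ P → dnb target (P ++ [num]) (target - num) = true := by
    intro hdi
    simp only [dnb, decide_eq_true_eq, hsimp]
    refine ⟨hnummem, ?_⟩
    intro h2
    have he : target - num = num := by omega
    rw [he, hcount_num]
    have h1 : 1 ≤ P.count num := List.count_pos_iff.mpr (he ▸ hdi)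
    omega
  have hspec_same : ∀ v, v ≠ num → v ≠ target - num →
      mSpec target P v = mSpec target (P ++ [num]) v := by
    intro v h1 h2
    unfold mSpec
    rw [dnb_append target P num v h2]
    have hm : (v ∈ P ++ [num]) ↔ v ∈ P := by simp [h1]
    simp [hm]
  by_cases hget : d.get? (target - num) = some none
  · -- A counts the pair {num, target - num} at this step
    have hspec := hd (target - num)
    rw [hget] at hspec
    have hdi : (target - num) ∈ P := by
      by_contra h; simp [mSpec, h] at hspec
    have hdn : dnb target P (target - num) = false := by
      cases h : dnb target P (target - num)
      · rfl
      · unfold mSpec at hspec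
        rw [if_pos hdi, h] at hspec
        simp at hspec
    have hdmem : target - num ∈ P ++ [num] := List.mem_append_left _ hdi
    have hstep : twoSumStep target (pair, d) num =
        (pair + 1, (d.insert (target - num) (some 1)).insert num (some 1)) := by
      simp [twoSumStep, hget, PySem.Dict.get?_insert_self]
    rw [hstep]
    constructor
    · -- dict invariant
      intro v
      show ((d.insert (target - num) (some 1)).insert num (some 1)).get? v =
        mSpec target (P ++ [num]) v
      rw [PySem.Dict.get?_insert]
      by_cases hvnum : v = num
      · subst hvnum
        rw [if_pos rfl]
        unfold mSpec
        rw [if_pos hnummem, key_dnb_self hdi]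
        simp
      · rw [if_neg hvnum, PySem.Dict.get?_insert]
        by_cases hvd : v = target - num
        · subst hvd
          rw [if_pos rfl]
          unfold mSpec
          rw [if_pos hdmem, key_dnb_diff hdi]
          simp
        · rw [if_neg hvd, hd v, hspec_same v hvnum hvd]
    · -- pair invariant
      show pair + 1 = (Zc target (P ++ [num]) : Int)
      suffices h : Zc target (P ++ [num]) = Zc target P + 1 by
        rw [hp, h]; push_cast; ring
      rw [Zc, hs']
      by_cases hnp : num ∈ P
      · -- self pair: target - num = num, seen exactly once before
        have hdn' := hdn
        simp only [dnb, decide_eq_false_iff_not, hsimp, not_and, not_forall] at hdn'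
        obtain ⟨h2, hcnt⟩ := hdn' hnp
        have hdm : target - num = num := by omega
        rw [PySem.Set.add_of_mem ((PySem.Set.mem_ofList P num).mpr hnp)]
        have hag : ∀ v ∈ PySem.Set.ofList P, v ≠ num →
            goodB target (P ++ [num]) v = goodB target P v := by
          intro v _ hv
          unfold goodB
          rw [dnb_append target P num v (by rw [hdm]; exact hv)]
        have hflip := countP_flip hnd ((PySem.Set.mem_ofList P num).mpr hnp)
          (goodB target (P ++ [num])) (goodB target P) hag
        have hf : goodB target (P ++ [num]) num = true := by
          unfold goodB
          rw [key_dnb_self hdi]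
          simp only [Bool.and_true, decide_eq_true_eq]
          omega
        have hg : goodB target P num = false := by
          unfold goodB
          rw [hdm] at hdn
          rw [hdn]
          simp
        rw [hf, hg] at hflip
        norm_num at hflip
        unfold Zc
        omega
      · -- two distinct values
        have hdne : target - num ≠ num := fun h => hnp (h ▸ hdi)
        rw [PySem.Set.add_of_not_mem (fun h => hnp ((PySem.Set.mem_ofList P num).mp h))]
        rw [List.countP_append]
        have hag : ∀ v ∈ PySem.Set.ofList P, v ≠ target - num →
            goodB target (P ++ [num]) v = goodB target P v := by
          intro v _ hv
          unfold goodB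
          rw [dnb_append target P num v hv]
        have hflip := countP_flip hnd ((PySem.Set.mem_ofList P (target - num)).mpr hdi)
          (goodB target (P ++ [num])) (goodB target P) hag
        have hfd : goodB target (P ++ [num]) (target - num) =
            decide (2 * (target - num) ≤ target) := by
          unfold goodB
          rw [key_dnb_diff hdi]
          simp
        have hgd : goodB target P (target - num) = false := by
          unfold goodB; rw [hdn]; simp
        have hdnbnum : dnb target (P ++ [num]) num = true := by
          simp only [dnb, decide_eq_true_eq]
          exact ⟨List.mem_append_left _ hdi,
            fun h2 => absurd (by omega : target - num = num) hdne⟩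
        have hfn : goodB target (P ++ [num]) num = decide (2 * num ≤ target) := by
          unfold goodB; rw [hdnbnum]; simp
        have hsing : List.countP (goodB target (P ++ [num])) [num] =
            if goodB target (P ++ [num]) num then 1 else 0 := by
          simp [List.countP_cons]
        rw [hsing, hfn]
        rw [hfd, hgd] at hflip
        norm_num at hflip
        unfold Zc
        by_cases hlt : 2 * num < target
        · have h1 : ¬ 2 * (target - num) ≤ target := by omega
          have h2 : 2 * num ≤ target := by omega
          rw [if_pos (by simpa using h2)]
          rw [if_neg (by simpa using h1)] at hflip
          omega
        · have h1 : 2 * (target - num) ≤ target := by omega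
          have h2 : ¬ 2 * num ≤ target := by omega
          rw [if_neg (by simpa using h2)]
          rw [if_pos (by simpa using h1)] at hflip
          omega
  · -- no pair counted at this step
    have hnd_or : (target - num) ∉ P ∨ dnb target P (target - num) = true := by
      by_contra h
      push_neg at h
      obtain ⟨h1, h2⟩ := h
      apply hget
      rw [hd (target - num)]
      unfold mSpec
      rw [if_pos h1, Bool.eq_false_iff.mpr h2]
      simp
    by_cases hgn : d.get? num = none
    · -- num not seen before
      have hnp : num ∉ P := by
        intro h
        rw [hd num] at hgn
        unfold mSpec at hgn
        rw [if_pos h] at hgn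
        simp at hgn
      have hdiP : (target - num) ∉ P := by
        rcases hnd_or with h | h
        · exact h
        · simp only [dnb, decide_eq_true_eq, hsimp] at h
          exact absurd h.1 hnp
      have hstep : twoSumStep target (pair, d) num = (pair, d.insert num none) := by
        simp [twoSumStep, hget, hgn]
      rw [hstep]
      have hdnnum : dnb target (P ++ [num]) num = false := by
        simp only [dnb, decide_eq_false_iff_not, not_and, not_forall]
        intro hc1
        have hdm : target - num = num := by
          rcases (by simpa using hc1 : (target - num) ∈ P ∨ target - num = num) with h | h
          · exact absurd h hdiP
          · exact h
        refine ⟨by omega, ?_⟩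
        rw [hcount_num]
        have : P.count num = 0 := List.count_eq_zero.mpr hnp
        omega
      constructor
      · intro v
        show (d.insert num none).get? v = mSpec target (P ++ [num]) v
        rw [PySem.Dict.get?_insert]
        by_cases hvnum : v = num
        · subst hvnum
          rw [if_pos rfl]
          unfold mSpec
          rw [if_pos hnummem, hdnnum]
          simp
        · rw [if_neg hvnum, hd v]
          by_cases hvd : v = target - num
          · subst hvd
            unfold mSpec
            have hm1 : (target - num) ∉ P ++ [num] := by
              simp only [List.mem_append, List.mem_singleton]
              rintro (h | h)
              · exact hdiP h
              · exact hvnum h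
            rw [if_neg hdiP, if_neg hm1]
          · exact hspec_same v hvnum hvd
      · show pair = (Zc target (P ++ [num]) : Int)
        suffices h : Zc target (P ++ [num]) = Zc target P by rw [hp, h]
        rw [Zc, hs',
          PySem.Set.add_of_not_mem (fun h => hnp ((PySem.Set.mem_ofList P num).mp h)),
          List.countP_append]
        have hcong : List.countP (goodB target (P ++ [num])) (PySem.Set.ofList P) =
            List.countP (goodB target P) (PySem.Set.ofList P) := by
          apply List.countP_congr
          intro v hv
          have hvP : v ∈ P := (PySem.Set.mem_ofList P v).mp hv
          have he : goodB target (P ++ [num]) v = goodB target P v := by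
            unfold goodB
            rw [dnb_append target P num v (fun h => hdiP (h ▸ hvP))]
          rw [he]
        have hzero : List.countP (goodB target (P ++ [num])) [num] = 0 := by
          have hgf : goodB target (P ++ [num]) num = false := by
            unfold goodB; rw [hdnnum]; simp
          simp [List.countP_cons, hgf]
        rw [hcong, hzero, Zc]
        omega
    · -- num seen before
      have hnp : num ∈ P := by
        by_contra h
        rw [hd num] at hgn
        unfold mSpec at hgn
        rw [if_neg h] at hgn
        exact hgn rfl
      have hstep : twoSumStep target (pair, d) num = (pair, d) := by
        simp [twoSumStep, hget, hgn]
      rw [hstep]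
      have hsame : ∀ v, mSpec target P v = mSpec target (P ++ [num]) v := by
        intro v
        by_cases hvd : v = target - num
        · subst hvd
          by_cases hdP : (target - num) ∈ P
          · have hT : dnb target P (target - num) = true := by
              rcases hnd_or with h | h
              · exact absurd hdP h
              · exact h
            unfold mSpec
            rw [if_pos hdP, if_pos (List.mem_append_left _ hdP), hT, key_dnb_diff hdP]
          · have hdm : target - num ≠ num := fun h => hdP (by rw [h]; exact hnp)
            unfold mSpec
            have hm1 : (target - num) ∉ P ++ [num] := by
              simp only [List.mem_append, List.mem_singleton]
              rintro (h | h)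
              · exact hdP h
              · exact hdm h
            rw [if_neg hdP, if_neg hm1]
        · by_cases hvnum : v = num
          · rw [hvnum]
            unfold mSpec
            rw [dnb_append target P num num (hvnum ▸ hvd), if_pos hnp, if_pos hnummem]
          · exact hspec_same v hvnum hvd
      constructor
      · intro v
        show d.get? v = mSpec target (P ++ [num]) v
        rw [hd v, hsame v]
      · show pair = (Zc target (P ++ [num]) : Int)
        suffices h : Zc target (P ++ [num]) = Zc target P by rw [hp, h]
        rw [Zc, hs', PySem.Set.add_of_mem ((PySem.Set.mem_ofList P num).mpr hnp)]
        apply List.countP_congr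
        intro v hv
        have hvP : v ∈ P := (PySem.Set.mem_ofList P v).mp hv
        by_cases hvd : v = target - num
        · subst hvd
          have hT : dnb target P (target - num) = true := by
            rcases hnd_or with h | h
            · exact absurd hvP h
            · exact h
          have he : goodB target (P ++ [num]) (target - num) =
              goodB target P (target - num) := by
            unfold goodB
            rw [hT, key_dnb_diff hvP]
          rw [he]
        · have he : goodB target (P ++ [num]) v = goodB target P v := by
            unfold goodB
            rw [dnb_append target P num v hvd]
          rw [he]

lemma loop_inv (target : Int) (l : List Int) : ∀ (P : List Int) (pair : Int)
    (d : PySem.Dict Int (Option Int)),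
    (∀ v, d.get? v = mSpec target P v) → pair = (Zc target P : Int) →
    (l.foldl (twoSumStep target) (pair, d)).1 = (Zc target (P ++ l) : Int) := by
  induction l with
  | nil => intro P pair d _ hp; simpa using hp
  | cons x xs ih =>
    intro P pair d hd hp
    have h := step_inv target P pair d hd hp x
    have : (x :: xs) = [x] ++ xs := rfl
    rw [List.foldl_cons]
    have := ih (P ++ [x]) (twoSumStep target (pair, d) x).1 (twoSumStep target (pair, d) x).2 h.1 h.2
    simpa [List.append_assoc] using this

lemma Zc_eq_alt (nums : List Int) (target : Int) :
    (Zc target nums : Int) = two_sum6_alt nums target := by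
  have hnd : (PySem.Set.ofList nums).Nodup := PySem.Set.nodup_ofList nums
  have hsplit : Zc target nums =
      (PySem.Set.ofList nums).countP
        (fun a => decide (2 * a < target) &&
          PySem.Set.contains (PySem.Set.ofList nums) (target - a)) +
      (PySem.Set.ofList nums).countP
        (fun v => decide (2 * v = target ∧ 2 ≤ nums.count v)) := by
    rw [Zc, countP_split]
    intro v hv
    have hvmem : v ∈ nums := (PySem.Set.mem_ofList nums v).mp hv
    by_cases he : 2 * v = target
    · have h1 : ¬ 2 * v < target := by omega
      have h3 : target - v = v := by omega
      constructor
      · simp only [goodB, dnb, h1, he, h3, decide_true, forall_const, decide_false,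
          Bool.false_and, Bool.false_or, Bool.true_and]
        by_cases hc : 2 ≤ nums.count v
        · have : v ∈ nums := List.count_pos_iff.mp (by omega)
          simp [hc, this]
        · simp [hc]
      · simp [h1]
    · constructor
      · by_cases h1 : 2 * v < target
        · have h2 : 2 * v ≤ target := by omega
          simp only [goodB, dnb, h1, he, h2, decide_true, Bool.true_and, decide_false,
            Bool.or_false, false_implies, and_true]
          have hco : PySem.Set.contains (PySem.Set.ofList nums) (target - v) =
              decide ((target - v) ∈ nums) := by
            rw [Bool.eq_iff_iff]
            simp [PySem.Set.contains_iff, PySem.Set.mem_ofList]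
          rw [hco]; simp
        · have h2 : ¬ 2 * v ≤ target := by omega
          simp [goodB, h1, he, h2]
      · simp [he]
  have hself : (PySem.Set.ofList nums).countP
      (fun v => decide (2 * v = target ∧ 2 ≤ nums.count v)) =
      if PySem.Int.mod target 2 = 0 ∧ 2 ≤ PySem.List.count nums (PySem.Int.floordiv target 2)
      then 1 else 0 := by
    by_cases hc : PySem.Int.mod target 2 = 0 ∧
        2 ≤ PySem.List.count nums (PySem.Int.floordiv target 2)
    · obtain ⟨hm, hcnt⟩ := hc
      set h0 := PySem.Int.floordiv target 2 with hh0
      have hcnt' : 2 ≤ nums.count h0 := by simpa [PySem.List.count] using hcnt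
      have h2 : 2 * h0 = target := by
        have := PySem.Int.floordiv_mul_add_mod target 2
        rw [hm] at this; omega
      have hmem : h0 ∈ PySem.Set.ofList nums :=
        (PySem.Set.mem_ofList nums h0).mpr (List.count_pos_iff.mp (by omega))
      have hcong : (PySem.Set.ofList nums).countP
          (fun v => decide (2 * v = target ∧ 2 ≤ nums.count v)) =
          (PySem.Set.ofList nums).countP (fun v => v == h0) := by
        apply List.countP_congr
        intro v hv
        simp only [decide_eq_true_eq, beq_iff_eq]
        constructor
        · rintro ⟨hv2, _⟩; omega
        · rintro rfl; exact ⟨h2, hcnt'⟩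
      rw [hcong]
      have : (PySem.Set.ofList nums).countP (fun v => v == h0) =
          (PySem.Set.ofList nums).count h0 := by simp [List.count]
      rw [this, List.count_eq_one_of_mem hnd hmem, if_pos ⟨hm, hcnt⟩]
    · rw [if_neg hc]
      apply List.countP_eq_zero.mpr
      intro v hv
      simp only [decide_eq_true_eq, not_and]
      intro hv2 hcnt
      apply hc
      have hm : PySem.Int.mod target 2 = 0 := by
        rw [PySem.Int.mod_eq_zero_iff_dvd]; exact ⟨v, by omega⟩
      have hf : PySem.Int.floordiv target 2 = v := by
        rw [PySem.Int.floordiv_eq_iff_of_pos (by norm_num)]; omega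
      have hpc : PySem.List.count nums (PySem.Int.floordiv target 2) = List.count v nums := by
        rw [hf]; simp [PySem.List.count]
      exact ⟨hm, hpc ▸ hcnt⟩
  rw [hsplit, hself, two_sum6_alt]
  split_ifs <;> push_cast <;> ring

lemma Zc_short (nums : List Int) (target : Int) (h : nums = [] ∨ nums.length = 1) :
    Zc target nums = 0 := by
  rcases h with h | h
  · subst h; rfl
  · obtain ⟨x, rfl⟩ := List.length_eq_one_iff.mp h
    have : PySem.Set.ofList [x] = [x] :=
      PySem.Set.ofList_eq_self_of_nodup [x] (List.nodup_singleton x)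
    rw [Zc, this]
    have hg : goodB target [x] x = false := by
      simp only [goodB, dnb, List.mem_singleton, List.count_singleton]
      by_cases he : target - x = x
      · have h2 : 2 * x = target := by omega
        simp [he, h2]
      · simp [he]
    simp [List.countP_cons, hg]

-- ===== VERDICT (by name: the statement is the Claim_ definition above) =====
theorem two_sum6_spec : Claim_equal_two_sum6 := by
  intro nums target _
  unfold Spec_two_sum6 two_sum6
  by_cases h : nums = [] ∨ nums.length = 1
  · simp only [h, if_true]
    rw [← Zc_eq_alt, Zc_short nums target h]; rfl
  · simp only [h, if_false]
    rw [← Zc_eq_alt]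
    have := loop_inv target nums [] 0 PySem.Dict.empty
      (by intro v; simp [mSpec, PySem.Dict.get?_empty]) (by simp [Zc])
    simpa using this
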